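-- pv_equiv track=rewrite | github.com/Jarvuslin/frontier-takehome | src/safco_agent/cli.py | _insert_seed_text
-- ===== SOURCE A (Python) =====
-- def _insert_seed_text(config_text: str, seed_id: str, url: str, label: str) -> str:
--     """Append a new seed entry inside the seeds: block, preserving all comments."""
--     new_entry = f'  - id: {seed_id}\n    url: "{url}"\n    label: "{label}"\n'
--     lines = config_text.splitlines(keepends=True)
--     in_seeds = False
--     last_seed_line = -1
--     for i, line in enumerate(lines):
--         if line.startswith("seeds:"):
--             in_seeds = True
--             continue
--         if in_seeds:
--             stripped = line.rstrip()
--             # A top-level YAML key: non-indented, non-comment, contains ":"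
--             if stripped and not stripped[0].isspace() and not stripped.startswith("#") and ":" in stripped:
--                 break
--             if stripped and stripped[0].isspace():
--                 last_seed_line = i
--     if last_seed_line == -1:
--         return config_text.rstrip() + "\n" + new_entry
--     return "".join(lines[: last_seed_line + 1]) + new_entry + "".join(lines[last_seed_line + 1 :])
-- ===== SOURCE B (Python) =====
-- def _insert_seed_text(config_text: str, seed_id: str, url: str, label: str) -> str:
--     """Append a new seed entry inside the seeds: block, preserving all comments."""
--     new_entry = f'  - id: {seed_id}\n    url: "{url}"\n    label: "{label}"\n'
--     lines = config_text.splitlines(keepends=True)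
--     # forward pass 1: locate the seeds: header
--     start = next((i for i, l in enumerate(lines) if l.startswith("seeds:")), None)
--     if start is None:
--         return config_text.rstrip() + "\n" + new_entry
--     # forward pass 2: locate the end of the block (first top-level key after it)
--     end = len(lines)
--     for j in range(start + 1, len(lines)):
--         if lines[j].startswith("seeds:"):
--             continue
--         s = lines[j].rstrip()
--         if s and not s[0].isspace() and not s.startswith("#") and ":" in s:
--             end = j
--             break
--     # backward pass: last indented non-blank line inside the block
--     for k in range(end - 1, start, -1):
--         s = lines[k].rstrip()
--         if s and s[0].isspace():
--             return "".join(lines[: k + 1]) + new_entry + "".join(lines[k + 1 :])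
--     return config_text.rstrip() + "\n" + new_entry
-- ===== Notes on version B (the rewrite author's own statement) =====
-- stated objective: alternative
-- what changed: A's single stateful forward scan (in_seeds flag plus running last-seed-line index) is replaced by three stateless passes: find the seeds: header, find the block's end (first top-level key), then scan backward from the end for the last indented non-blank line and splice the entry there.
import Mathlib
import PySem

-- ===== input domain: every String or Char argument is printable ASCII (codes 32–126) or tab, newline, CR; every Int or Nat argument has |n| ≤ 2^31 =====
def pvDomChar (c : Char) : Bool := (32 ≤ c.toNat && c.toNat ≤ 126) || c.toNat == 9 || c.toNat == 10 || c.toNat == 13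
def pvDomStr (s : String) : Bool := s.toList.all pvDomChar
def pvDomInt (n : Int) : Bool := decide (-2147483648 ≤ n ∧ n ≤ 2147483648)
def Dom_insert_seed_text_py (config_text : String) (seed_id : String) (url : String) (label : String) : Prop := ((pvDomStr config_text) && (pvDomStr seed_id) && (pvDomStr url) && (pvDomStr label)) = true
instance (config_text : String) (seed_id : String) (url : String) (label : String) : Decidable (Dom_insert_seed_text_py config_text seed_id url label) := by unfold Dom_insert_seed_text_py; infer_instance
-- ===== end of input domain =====

-- B replaces A's single stateful forward scan (flag + running last index) by three
-- stateless scans: find the block start, find the block end, then scan BACKWARD for the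
-- insertion line; same return value (objective: alternative decomposition, same cost).

-- shared helpers: both Pythons build the same entry string and call the same built-ins
-- (splitlines(keepends=True), rstrip, startswith, isspace, ':' in s) on lines.

-- new_entry = f'  - id: {seed_id}\n    url: "{url}"\n    label: "{label}"\n'
def pvNewEntry (seed_id : String) (url : String) (label : String) : List Char :=
  "  - id: ".toList ++ seed_id.toList ++ "\n    url: \"".toList ++ url.toList
    ++ "\"\n    label: \"".toList ++ label.toList ++ "\"\n".toList

-- config_text.splitlines(keepends=True), hand port (PySem.Chars.splitlines drops the ends);
-- exact on Dom, where the only line breaks are '\n', '\r' and '\r\n'.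
def pvSplitKeep : List Char → List Char → List (List Char)
  | acc, [] => if acc.isEmpty then [] else [acc.reverse]
  | acc, '\r' :: '\n' :: rest => (acc.reverse ++ ['\r', '\n']) :: pvSplitKeep [] rest
  | acc, '\r' :: rest => (acc.reverse ++ ['\r']) :: pvSplitKeep [] rest
  | acc, '\n' :: rest => (acc.reverse ++ ['\n']) :: pvSplitKeep [] rest
  | acc, c :: rest => pvSplitKeep (c :: acc) rest

-- line.startswith("seeds:")
def pvIsSeedsHdr (line : List Char) : Bool := PySem.Chars.startswith line "seeds:".toList

-- stripped = line.rstrip(); stripped and not stripped[0].isspace()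
--   and not stripped.startswith("#") and ":" in stripped
def pvBrk (line : List Char) : Bool :=
  let s := PySem.Chars.rstrip line
  !s.isEmpty && !(PySem.Chars.isspace (s.headD ' ')) && !(PySem.Chars.startswith s ['#'])
    && PySem.Chars.isIn [':'] s

-- stripped = line.rstrip(); stripped and stripped[0].isspace()
def pvSed (line : List Char) : Bool :=
  let s := PySem.Chars.rstrip line
  !s.isEmpty && PySem.Chars.isspace (s.headD ' ')

-- ===== PORT A =====
-- A's for-loop: state (i, in_seeds, last_seed_line); break returns last.
def pvALoop (lines : List (List Char)) (i : Nat) (in_seeds : Bool) (last : Int) : Int :=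
  match lines with
  | [] => last
  | line :: rest =>
    if pvIsSeedsHdr line then pvALoop rest (i + 1) true last
    else if in_seeds then
      if pvBrk line then last
      else if pvSed line then pvALoop rest (i + 1) in_seeds (Int.ofNat i)
      else pvALoop rest (i + 1) in_seeds last
    else pvALoop rest (i + 1) in_seeds last

-- "".join(lines[:n]) is ported as .flatten of the sliced list of char-lists (exact).
def insert_seed_text_py (config_text : String) (seed_id : String) (url : String) (label : String) : String :=
  let new_entry := pvNewEntry seed_id url label
  let cs := config_text.toList
  let lines := pvSplitKeep [] cs
  let last := pvALoop lines 0 false (-1)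
  if last = -1 then String.mk (PySem.Chars.rstrip cs ++ '\n' :: new_entry)
  else String.mk ((PySem.List.slice lines none (some (last + 1))).flatten ++ new_entry
        ++ (PySem.List.slice lines (some (last + 1)) none).flatten)

-- ===== PORT B =====
-- pass 1: next((i for i, l in enumerate(lines) if l.startswith("seeds:")), None)
def pvFindStart : List (List Char) → Nat → Option Nat
  | [], _ => none
  | l :: rest, i => if pvIsSeedsHdr l then some i else pvFindStart rest (i + 1)

-- pass 2: for j in range(start+1, len(lines)):  continue on header, break on top-level key
def pvFindEnd : List (List Char) → Nat → Nat → Nat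
  | [], _, dflt => dflt
  | l :: rest, j, dflt =>
    if pvIsSeedsHdr l then pvFindEnd rest (j + 1) dflt
    else if pvBrk l then j
    else pvFindEnd rest (j + 1) dflt

-- pass 3: for k in range(end-1, start, -1): return first k with sed(lines[k])
-- (k is always a valid index when tested; getD's default is never read)
def pvFindLast (lines : List (List Char)) (start : Nat) (k : Nat) : Option Nat :=
  if _h : k ≤ start then none
  else if pvSed (lines.getD k []) then some k
  else pvFindLast lines start (k - 1)
termination_by k
decreasing_by omega

-- lines[:k+1] / lines[k+1:] with k : Nat, so take/drop are the exact slices.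
def insert_seed_text_py_alt (config_text : String) (seed_id : String) (url : String) (label : String) : String :=
  let new_entry := pvNewEntry seed_id url label
  let cs := config_text.toList
  let lines := pvSplitKeep [] cs
  match pvFindStart lines 0 with
  | none => String.mk (PySem.Chars.rstrip cs ++ '\n' :: new_entry)
  | some start =>
    let e := pvFindEnd (lines.drop (start + 1)) (start + 1) lines.length
    match pvFindLast lines start (e - 1) with
    | none => String.mk (PySem.Chars.rstrip cs ++ '\n' :: new_entry)
    | some k => String.mk ((lines.take (k + 1)).flatten ++ new_entry ++ (lines.drop (k + 1)).flatten)

-- ===== PRECONDITION & SPEC =====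
def Spec_insert_seed_text_py (config_text : String) (seed_id : String) (url : String) (label : String) (out : String) : Prop := out = insert_seed_text_py_alt config_text seed_id url label
instance (config_text : String) (seed_id : String) (url : String) (label : String) (out : String) : Decidable (Spec_insert_seed_text_py config_text seed_id url label out) := by unfold Spec_insert_seed_text_py; infer_instance

-- ===== CLAIM (what is proved, stated in full; the proofs are below) =====
def Claim_equal_insert_seed_text_py : Prop := ∀ (config_text : String) (seed_id : String) (url : String) (label : String), Dom_insert_seed_text_py config_text seed_id url label → Spec_insert_seed_text_py config_text seed_id url label (insert_seed_text_py config_text seed_id url label)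

-- ===== LEMMAS AND PROOFS =====

-- proof-side: length of the prefix of the block A's loop actually scans (up to break)
def pvPIdx : List (List Char) → Nat
  | [] => 0
  | l :: rest => if pvIsSeedsHdr l then pvPIdx rest + 1
                 else if pvBrk l then 0
                 else pvPIdx rest + 1

-- proof-side: last index ≥ b of a sed line before the first break, forward recursion
def pvLastSed : List (List Char) → Nat → Option Nat
  | [], _ => none
  | l :: rest, b =>
    if pvIsSeedsHdr l then pvLastSed rest (b + 1)
    else if pvBrk l then none
    else if pvSed l then (pvLastSed rest (b + 1)).orElse (fun _ => some b)
    else pvLastSed rest (b + 1)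

-- proof-side: same, on a break-free list
def pvLastSedP : List (List Char) → Nat → Option Nat
  | [], _ => none
  | l :: rest, b =>
    if pvSed l then (pvLastSedP rest (b + 1)).orElse (fun _ => some b)
    else pvLastSedP rest (b + 1)

lemma pvSed_of_hdr (l : List Char) (h : pvIsSeedsHdr l = true) : pvSed l = false := by
  obtain ⟨u, rfl⟩ : ∃ u, l = 's' :: u := by
    rw [pvIsSeedsHdr, PySem.Chars.startswith_iff] at h
    obtain ⟨t, ht⟩ := h
    cases l with
    | nil => simp at ht
    | cons c rest =>
      refine ⟨rest, ?_⟩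
      have : c = 's' := by
        have := congrArg (fun xs => xs.headD ' ') ht
        simpa using this.symm
      simp [this]
  simp only [pvSed, PySem.Chars.rstrip, List.reverse_cons, List.dropWhile_append]
  split_ifs with hdw
  · simp [PySem.Chars.isspace]
  · rcases hx : List.dropWhile PySem.Chars.isspace u.reverse with _ | ⟨a, as⟩
    · simp [hx] at hdw
    · simp [hx, PySem.Chars.isspace]

lemma pvFindStart_ge : ∀ (xs : List (List Char)) (i s : Nat), pvFindStart xs i = some s → i ≤ s := by
  intro xs
  induction xs with
  | nil => intro i s h; simp [pvFindStart] at h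
  | cons l rest ih =>
    intro i s h
    rw [pvFindStart] at h
    split_ifs at h with hh
    · injection h with h; omega
    · have := ih (i + 1) s h; omega

lemma pvFindStart_lt : ∀ (xs : List (List Char)) (i s : Nat), pvFindStart xs i = some s → s < i + xs.length := by
  intro xs
  induction xs with
  | nil => intro i s h; simp [pvFindStart] at h
  | cons l rest ih =>
    intro i s h
    rw [pvFindStart] at h
    split_ifs at h with hh
    · injection h with h; simp only [List.length_cons]; omega
    · have := ih (i + 1) s h; simp [List.length_cons]; omega

lemma pvALoop_false : ∀ (xs : List (List Char)) (i : Nat) (last : Int),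
    pvALoop xs i false last =
      match pvFindStart xs i with
      | none => last
      | some s => pvALoop (xs.drop (s + 1 - i)) (s + 1) true last := by
  intro xs
  induction xs with
  | nil => intro i last; simp [pvALoop, pvFindStart]
  | cons l rest ih =>
    intro i last
    rw [pvALoop, pvFindStart]
    by_cases hh : pvIsSeedsHdr l = true
    · rw [if_pos hh, if_pos hh]
      simp
    · rw [if_neg hh, if_neg hh, if_neg (Bool.false_ne_true), ih]
      cases hs : pvFindStart rest (i + 1) with
      | none => simp
      | some s =>
        have hge := pvFindStart_ge rest (i + 1) s hs
        simp only
        have hdrop : (l :: rest).drop (s + 1 - i) = rest.drop (s + 1 - (i + 1)) := by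
          have h1 : s + 1 - i = (s + 1 - (i + 1)) + 1 := by omega
          rw [h1, List.drop_succ_cons]
        rw [hdrop]

lemma pvALoop_true : ∀ (xs : List (List Char)) (i : Nat) (last : Int),
    pvALoop xs i true last = ((pvLastSed xs i).map Int.ofNat).getD last := by
  intro xs
  induction xs with
  | nil => intro i last; simp [pvALoop, pvLastSed]
  | cons l rest ih =>
    intro i last
    rw [pvALoop, pvLastSed]
    by_cases h1 : pvIsSeedsHdr l = true
    · rw [if_pos h1, if_pos h1]
      exact ih (i + 1) last
    · rw [if_neg h1, if_neg h1, if_pos rfl]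
      by_cases h2 : pvBrk l = true
      · rw [if_pos h2, if_pos h2]
        simp
      · rw [if_neg h2, if_neg h2]
        by_cases h3 : pvSed l = true
        · rw [if_pos h3, if_pos h3, ih]
          cases hs : pvLastSed rest (i + 1) with
          | none => simp [Option.orElse]
          | some j => simp [Option.orElse]
        · rw [if_neg h3, if_neg h3]
          exact ih (i + 1) last

lemma pvLastSed_take : ∀ (xs : List (List Char)) (b : Nat),
    pvLastSed xs b = pvLastSedP (xs.take (pvPIdx xs)) b := by
  intro xs
  induction xs with
  | nil => intro b; simp [pvLastSed, pvPIdx, pvLastSedP]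
  | cons l rest ih =>
    intro b
    rw [pvLastSed, pvPIdx]
    split_ifs with h1 h2 h3
    · rw [List.take_succ_cons, pvLastSedP, pvSed_of_hdr l h1, if_neg (Bool.false_ne_true)]
      exact ih (b + 1)
    · simp [pvLastSedP]
    · rw [List.take_succ_cons, pvLastSedP, if_pos h3, ih (b + 1)]
    · rw [List.take_succ_cons, pvLastSedP, if_neg (by simp [h3]), ih (b + 1)]

lemma pvLastSedP_snoc : ∀ (pre : List (List Char)) (l : List Char) (b : Nat),
    pvLastSedP (pre ++ [l]) b = if pvSed l then some (b + pre.length) else pvLastSedP pre b := by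
  intro pre
  induction pre with
  | nil => intro l b; simp [pvLastSedP, Option.orElse]
  | cons p pre ih =>
    intro l b
    rw [List.cons_append, pvLastSedP, pvLastSedP, ih]
    split_ifs with h1 h2 h2
    · cases hs : pvLastSedP pre (b + 1) <;>
        simp [Option.orElse, List.length_cons, Nat.add_comm, Nat.add_assoc, Nat.add_left_comm]
    · rfl
    · simp [List.length_cons]; omega
    · rfl

lemma pvPIdx_le : ∀ (xs : List (List Char)), pvPIdx xs ≤ xs.length := by
  intro xs
  induction xs with
  | nil => simp [pvPIdx]
  | cons l rest ih =>
    rw [pvPIdx]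
    split_ifs <;> (simp only [List.length_cons]; omega)

lemma pvFindEnd_eq : ∀ (xs : List (List Char)) (i d : Nat), d = i + xs.length →
    pvFindEnd xs i d = i + pvPIdx xs := by
  intro xs
  induction xs with
  | nil => intro i d hd; simp [pvFindEnd, pvPIdx, hd]
  | cons l rest ih =>
    intro i d hd
    rw [pvFindEnd, pvPIdx]
    split_ifs with h1 h2
    · rw [ih (i + 1) d (by simp [hd, List.length_cons]; omega)]; omega
    · omega
    · rw [ih (i + 1) d (by simp [hd, List.length_cons]; omega)]; omega

lemma pvFindLast_eq : ∀ (pre : List (List Char)) (lines : List (List Char)) (s : Nat),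
    (∀ m, m < pre.length → lines.getD (s + 1 + m) [] = pre.getD m []) →
    pvFindLast lines s (s + pre.length) = pvLastSedP pre (s + 1) := by
  intro pre
  induction pre using List.reverseRecOn with
  | nil =>
    intro lines s _
    rw [pvFindLast]
    simp [pvLastSedP]
  | append_singleton pre l ih =>
    intro lines s hget
    have hlen : (pre ++ [l]).length = pre.length + 1 := by simp
    rw [hlen, pvFindLast]
    rw [dif_neg (by omega)]
    have hL : lines.getD (s + (pre.length + 1)) [] = l := by
      have h1 := hget pre.length (by simp)
      have h2 : (pre ++ [l]).getD pre.length [] = l := by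
        simp [List.getD_eq_getElem?_getD, List.getElem?_append_right]
      rw [← h2, ← h1]
      congr 1
      omega
    rw [hL, pvLastSedP_snoc]
    split_ifs with hsed
    · exact congrArg some (by omega)
    · have h3 : s + (pre.length + 1) - 1 = s + pre.length := by omega
      rw [h3]
      exact ih lines s (fun m hm => by
        rw [hget m (by simp; omega)]
        simp [List.getD_eq_getElem?_getD, List.getElem?_append_left hm])

lemma pvCore (cs new_entry : List Char) (lines : List (List Char)) :
    (if pvALoop lines 0 false (-1) = -1 then String.mk (PySem.Chars.rstrip cs ++ '\n' :: new_entry)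
     else String.mk ((PySem.List.slice lines none (some (pvALoop lines 0 false (-1) + 1))).flatten ++ new_entry
        ++ (PySem.List.slice lines (some (pvALoop lines 0 false (-1) + 1)) none).flatten)) =
    (match pvFindStart lines 0 with
     | none => String.mk (PySem.Chars.rstrip cs ++ '\n' :: new_entry)
     | some start =>
       match pvFindLast lines start (pvFindEnd (lines.drop (start + 1)) (start + 1) lines.length - 1) with
       | none => String.mk (PySem.Chars.rstrip cs ++ '\n' :: new_entry)
       | some k => String.mk ((lines.take (k + 1)).flatten ++ new_entry ++ (lines.drop (k + 1)).flatten)) := by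
  rw [pvALoop_false]
  cases hstart : pvFindStart lines 0 with
  | none => simp
  | some s =>
    simp only
    have hslt : s < lines.length := by
      have := pvFindStart_lt lines 0 s hstart
      omega
    set ys := lines.drop (s + 1) with hys
    have hyslen : lines.length = (s + 1) + ys.length := by
      rw [hys, List.length_drop]; omega
    have hdrop0 : lines.drop (s + 1 - 0) = ys := by simp [hys]
    rw [hdrop0, pvALoop_true]
    have hend : pvFindEnd ys (s + 1) lines.length = (s + 1) + pvPIdx ys :=
      pvFindEnd_eq ys (s + 1) lines.length hyslen
    rw [hend]
    set pre := ys.take (pvPIdx ys) with hpre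
    have hpidx : pvPIdx ys ≤ ys.length := pvPIdx_le ys
    have hprelen : pre.length = pvPIdx ys := by
      rw [hpre, List.length_take]; omega
    have hem1 : (s + 1) + pvPIdx ys - 1 = s + pre.length := by omega
    rw [hem1]
    have hget : ∀ m, m < pre.length → lines.getD (s + 1 + m) [] = pre.getD m [] := by
      intro m hm
      have hm' : m < pvPIdx ys := by omega
      simp only [List.getD_eq_getElem?_getD]
      rw [hpre, List.getElem?_take_of_lt hm', hys, List.getElem?_drop]
    rw [pvFindLast_eq pre lines s hget, ← pvLastSed_take]
    cases hls : pvLastSed ys (s + 1) with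
    | none => simp
    | some k =>
      simp only [Option.map_some, Option.getD_some]
      rw [if_neg (by simp)]
      have h1 : Int.ofNat k + 1 = ((k + 1 : Nat) : Int) := by simp
      rw [h1, PySem.List.slice_to lines (by positivity), PySem.List.slice_from lines (by positivity)]
      simp

-- ===== VERDICT (by name: the statement is the Claim_ definition above) =====
theorem insert_seed_text_py_spec : Claim_equal_insert_seed_text_py := by
  intro config_text seed_id url label _
  exact pvCore config_text.toList (pvNewEntry seed_id url label)
    (pvSplitKeep [] config_text.toList)
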